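-- pv_equiv track=rewrite | github.com/yishaiar/breast_cancer_PHD_research | functions/usefull_functions.py | removeFeatures
-- ===== SOURCE A (Python) =====
-- def removeFeatures(dict,remove_features =['']):
--
--   for key in dict.keys():
--     if dict[key] is not None:
--         list_ = dict[key].copy()
--
--         for feature in remove_features:
--             try:
--                 list_.remove(feature)
--             except:
--                 pass
--         dict[key] = list_
--   return dict
-- ===== SOURCE B (Python) =====
-- def removeFeatures(dict, remove_features=['']):
--     # Build removal counts once, then filter each list in a single pass.
--     counts = {}
--     for f in remove_features:
--         counts[f] = counts.get(f, 0) + 1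
--     for key in dict:
--         lst = dict[key]
--         if lst is not None:
--             rem = counts.copy()
--             out = []
--             for x in lst:
--                 c = rem.get(x, 0)
--                 if c != 0:
--                     rem[x] = c - 1
--                 else:
--                     out.append(x)
--             dict[key] = out
--     return dict
-- ===== Notes on version B (the rewrite author's own statement) =====
-- stated objective: faster
-- what changed: Instead of scanning each value list once per feature with list.remove, B precomputes a removal-count dict once and filters every list in a single pass, decrementing counts.
import Mathlib
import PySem

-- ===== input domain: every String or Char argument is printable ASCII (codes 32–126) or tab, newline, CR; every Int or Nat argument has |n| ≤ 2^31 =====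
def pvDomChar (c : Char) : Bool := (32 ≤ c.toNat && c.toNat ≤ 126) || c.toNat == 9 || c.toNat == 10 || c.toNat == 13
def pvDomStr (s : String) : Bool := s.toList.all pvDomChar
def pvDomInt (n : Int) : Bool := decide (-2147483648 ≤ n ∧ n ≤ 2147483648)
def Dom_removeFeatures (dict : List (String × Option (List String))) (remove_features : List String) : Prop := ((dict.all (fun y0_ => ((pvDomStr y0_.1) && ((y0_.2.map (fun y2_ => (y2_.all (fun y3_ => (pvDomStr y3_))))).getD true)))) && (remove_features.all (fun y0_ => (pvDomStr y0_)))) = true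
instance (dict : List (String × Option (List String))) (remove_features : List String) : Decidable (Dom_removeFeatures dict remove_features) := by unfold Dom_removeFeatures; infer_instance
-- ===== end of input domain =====

-- B replaces A's per-feature list.remove scans by one precomputed removal-count dict and a
-- single filtering pass per value list (objective: faster, asymptotic). Both A and B mutate
-- the input dict in place in Python; the equivalence proved here is about the return value.

-- ===== PORT A =====
-- list_.remove(feature) inside try/except: remove first occurrence, ignore ValueError
def pvRemoveOnce (list_ : List String) (feature : String) : List String :=
  match PySem.List.remove? list_ feature with
  | some l' => l'
  | none => list_

def removeFeatures (dict : List (String × Option (List String))) (remove_features : List String) : List (String × Option (List String)) :=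
  dict.map (fun kv =>
    match kv.2 with
    | none => kv
    | some v => (kv.1, some (remove_features.foldl pvRemoveOnce v)))

-- ===== PORT B =====
def pvCounts (remove_features : List String) : PySem.Dict String Int :=
  remove_features.foldl (fun d f => d.insert f (d.getD f 0 + 1)) PySem.Dict.empty

def pvFilterCounts (counts : PySem.Dict String Int) (lst : List String) : List String :=
  (lst.foldl (fun (st : PySem.Dict String Int × List String) x =>
      let c := st.1.getD x 0
      if c ≠ 0 then (st.1.insert x (c - 1), st.2) else (st.1, st.2 ++ [x]))
    (counts, [])).2

def removeFeatures_alt (dict : List (String × Option (List String))) (remove_features : List String) : List (String × Option (List String)) :=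
  let counts := pvCounts remove_features
  dict.map (fun kv =>
    match kv.2 with
    | none => kv
    | some lst => (kv.1, some (pvFilterCounts counts lst)))

-- ===== PRECONDITION & SPEC =====
def Spec_removeFeatures (dict : List (String × Option (List String))) (remove_features : List String) (out : List (String × Option (List String))) : Prop := out = removeFeatures_alt dict remove_features
instance (dict : List (String × Option (List String))) (remove_features : List String) (out : List (String × Option (List String))) : Decidable (Spec_removeFeatures dict remove_features out) := by unfold Spec_removeFeatures; infer_instance

-- ===== CLAIM (what is proved, stated in full; the proofs are below) =====
def Claim_equal_removeFeatures : Prop := ∀ (dict : List (String × Option (List String))) (remove_features : List String), Dom_removeFeatures dict remove_features → Spec_removeFeatures dict remove_features (removeFeatures dict remove_features)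

-- ===== LEMMAS AND PROOFS =====

-- abstract one-pass count-filter, with counts as a plain function (proof helper)
def stripF : (String → Int) → List String → List String
  | _, [] => []
  | f, x :: xs => if f x ≠ 0 then stripF (Function.update f x (f x - 1)) xs else x :: stripF f xs

theorem pvRemoveOnce_nil (v : String) : pvRemoveOnce [] v = [] := by
  simp [pvRemoveOnce, PySem.List.remove?]

theorem pvRemoveOnce_cons_self (x : String) (xs : List String) : pvRemoveOnce (x :: xs) x = xs := by
  simp [pvRemoveOnce]

theorem pvRemoveOnce_cons_of_ne (x v : String) (xs : List String) (h : x ≠ v) :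
    pvRemoveOnce (x :: xs) v = x :: pvRemoveOnce xs v := by
  unfold pvRemoveOnce
  rw [PySem.List.remove?_cons_of_ne (h := h)]
  cases PySem.List.remove? xs v <;> simp

theorem stripF_zero (l : List String) : stripF (fun _ => (0:Int)) l = l := by
  induction l with
  | nil => rfl
  | cons x xs ih => simp [stripF, ih]

theorem stripF_update (l : List String) : ∀ (f : String → Int), (∀ s, 0 ≤ f s) → ∀ v,
    stripF (Function.update f v (f v + 1)) l = stripF f (pvRemoveOnce l v) := by
  induction l with
  | nil => intro f _ v; rw [pvRemoveOnce_nil]; rfl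
  | cons x xs ih =>
    intro f hf v
    by_cases hx : x = v
    · subst hx
      rw [pvRemoveOnce_cons_self]
      have h1 : Function.update f x (f x + 1) x = f x + 1 := by simp
      have hne : Function.update f x (f x + 1) x ≠ 0 := by
        rw [h1]; have := hf x; omega
      show (if Function.update f x (f x + 1) x ≠ 0 then
              stripF (Function.update (Function.update f x (f x + 1)) x
                (Function.update f x (f x + 1) x - 1)) xs
            else x :: stripF (Function.update f x (f x + 1)) xs) = stripF f xs
      rw [if_pos hne, h1]
      have : Function.update (Function.update f x (f x + 1)) x (f x + 1 - 1) = f := by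
        funext s; by_cases hs : s = x <;> simp [Function.update, hs]
      rw [this]
    · rw [pvRemoveOnce_cons_of_ne _ _ _ hx]
      have hval : Function.update f v (f v + 1) x = f x := Function.update_of_ne hx _ _
      by_cases hz : f x ≠ 0
      · show (if Function.update f v (f v + 1) x ≠ 0 then
                stripF (Function.update (Function.update f v (f v + 1)) x
                  (Function.update f v (f v + 1) x - 1)) xs
              else x :: stripF (Function.update f v (f v + 1)) xs)
            = stripF f (x :: pvRemoveOnce xs v)
        rw [if_pos (by rw [hval]; exact hz), hval]
        have hg : Function.update (Function.update f v (f v + 1)) x (f x - 1)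
            = Function.update (Function.update f x (f x - 1)) v
                (Function.update f x (f x - 1) v + 1) := by
          funext s
          by_cases hs : s = x
          · subst hs; simp [Function.update, hx]
          · by_cases hsv : s = v <;> simp [Function.update, hs, hsv, Ne.symm hx]
        rw [hg, ih (Function.update f x (f x - 1))
              (by intro s; by_cases hs : s = x <;> simp [Function.update, hs] <;> [skip; exact hf s]; have := hf x; omega) v]
        show stripF (Function.update f x (f x - 1)) (pvRemoveOnce xs v)
            = stripF f (x :: pvRemoveOnce xs v)
        simp [stripF, hz]
      · rw [not_not] at hz
        show (if Function.update f v (f v + 1) x ≠ 0 then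
                stripF (Function.update (Function.update f v (f v + 1)) x
                  (Function.update f v (f v + 1) x - 1)) xs
              else x :: stripF (Function.update f v (f v + 1)) xs)
            = stripF f (x :: pvRemoveOnce xs v)
        rw [if_neg (by rw [hval, hz]; simp)]
        rw [ih f hf v]
        simp [stripF, hz]

theorem stripF_counts (rf : List String) : ∀ (f : String → Int), (∀ s, 0 ≤ f s) → ∀ l,
    stripF (fun s => f s + (rf.count s : Int)) l = stripF f (rf.foldl pvRemoveOnce l) := by
  induction rf with
  | nil =>
    intro f _ l
    have : (fun s => f s + ((List.count s ([] : List String)) : Int)) = f := by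
      funext s; simp
    rw [this]; rfl
  | cons feat rest ih =>
    intro f hf l
    have hfun : (fun s => f s + ((feat :: rest).count s : Int))
        = Function.update (fun s => f s + ((rest.count s : Int))) feat
            ((fun s => f s + ((rest.count s : Int))) feat + 1) := by
      funext s
      by_cases hs : s = feat
      · subst hs; simp; ring
      · simp [Function.update, hs, Ne.symm hs]
    rw [hfun, stripF_update l (fun s => f s + ((rest.count s : Int)))
          (by intro s; have := hf s; positivity) feat]
    rw [ih f hf (pvRemoveOnce l feat)]
    rfl

theorem getD_pvCounts (rf : List String) (s : String) :
    (pvCounts rf).getD s 0 = (rf.count s : Int) := by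
  unfold pvCounts
  rw [PySem.Dict.getD_foldl_insert_add_one]
  simp

theorem pvFilterCounts_fold (lst : List String) : ∀ (c : PySem.Dict String Int) (out : List String),
    (lst.foldl (fun (st : PySem.Dict String Int × List String) x =>
        let cv := st.1.getD x 0
        if cv ≠ 0 then (st.1.insert x (cv - 1), st.2) else (st.1, st.2 ++ [x]))
      (c, out)).2 = out ++ stripF (fun s => c.getD s 0) lst := by
  induction lst with
  | nil => intro c out; simp [stripF]
  | cons x xs ih =>
    intro c out
    by_cases hz : c.getD x 0 ≠ 0
    · simp only [List.foldl_cons, if_pos hz]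
      rw [ih]
      have : (fun s => (c.insert x (c.getD x 0 - 1)).getD s 0)
          = Function.update (fun s => c.getD s 0) x (c.getD x 0 - 1) := by
        funext s
        by_cases hs : s = x
        · subst hs; simp [PySem.Dict.getD_insert_self]
        · rw [PySem.Dict.getD_insert, Function.update_of_ne hs]; rw [if_neg hs]
      simp only [stripF, if_pos hz, this]
    · simp only [List.foldl_cons, if_neg hz]
      rw [ih]
      simp only [stripF, if_neg hz, List.append_assoc, List.singleton_append]

theorem per_list (rf : List String) (lst : List String) :
    pvFilterCounts (pvCounts rf) lst = rf.foldl pvRemoveOnce lst := by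
  unfold pvFilterCounts
  rw [pvFilterCounts_fold]
  have h1 : (fun s => (pvCounts rf).getD s 0) = fun s => (0:Int) + (rf.count s : Int) := by
    funext s; rw [getD_pvCounts]; ring
  rw [h1, stripF_counts rf (fun _ => (0:Int)) (fun _ => le_refl 0) lst]
  rw [stripF_zero]
  simp

-- ===== VERDICT (by name: the statement is the Claim_ definition above) =====
theorem removeFeatures_spec : Claim_equal_removeFeatures := by
  intro dict rf _
  unfold Spec_removeFeatures removeFeatures removeFeatures_alt
  apply List.map_congr_left
  intro kv _
  cases h : kv.2 with
  | none => rfl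
  | some v => simp [per_list]
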